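-- pv_equiv track=rewrite | github.com/6210qwe/leetcode_py | leetcode_solutions/by_id/q3593.py | max_factor_score
-- ===== SOURCE A (Python) =====
-- from typing import List
-- from math import gcd
-- from functools import reduce
--
-- def lcm(a, b):
--     return a * b // gcd(a, b)
--
-- def max_factor_score(nums: List[int]) -> int:
--     if len(nums) == 1:
--         return nums[0] ** 2
--
--     def array_lcm(arr):
--         return reduce(lcm, arr)
--
--     def array_gcd(arr):
--         return reduce(gcd, arr)
--
--     full_lcm = array_lcm(nums)
--     full_gcd = array_gcd(nums)
--     max_score = full_lcm * full_gcd
--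
--     for i in range(len(nums)):
--         new_nums = nums[:i] + nums[i+1:]
--         new_lcm = array_lcm(new_nums)
--         new_gcd = array_gcd(new_nums)
--         max_score = max(max_score, new_lcm * new_gcd)
--
--     return max_score
-- ===== SOURCE B (Python) =====
-- from math import gcd
--
-- def max_factor_score(nums):
--     n = len(nums)
--     if n == 1:
--         return nums[0] ** 2
--     # suffix lcm/gcd arrays (reduce-style folds of nums[i:])
--     suf_l = [0] * n
--     suf_g = [0] * n
--     suf_l[n - 1] = nums[n - 1]
--     suf_g[n - 1] = nums[n - 1]
--     for i in range(n - 2, -1, -1):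
--         suf_l[i] = suf_l[i + 1] * nums[i] // gcd(suf_l[i + 1], nums[i])
--         suf_g[i] = gcd(suf_g[i + 1], nums[i])
--     best = suf_l[0] * suf_g[0]                 # no removal
--     best = max(best, suf_l[1] * suf_g[1])      # remove index 0
--     pre_l = nums[0]
--     pre_g = nums[0]
--     for i in range(1, n):
--         if i == n - 1:
--             cand = pre_l * pre_g               # remove last element
--         else:
--             l = pre_l * suf_l[i + 1] // gcd(pre_l, suf_l[i + 1])
--             g = gcd(pre_g, suf_g[i + 1])
--             cand = l * g
--         best = max(best, cand)
--         pre_l = pre_l * nums[i] // gcd(pre_l, nums[i])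
--         pre_g = gcd(pre_g, nums[i])
--     return best
-- ===== Notes on version B (the rewrite author's own statement) =====
-- stated objective: faster
-- what changed: Replaces the O(n^2) re-reduction of every leave-one-out slice by one suffix pass building suffix lcm/gcd arrays plus one forward pass keeping running prefix lcm/gcd, so each removal is answered by one O(1) combine.
-- outside the precondition, e.g. on max_factor_score([]): A raises TypeError, B raises IndexError; on max_factor_score([0, 0]): A raises ZeroDivisionError, B raises ZeroDivisionError
import Mathlib
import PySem

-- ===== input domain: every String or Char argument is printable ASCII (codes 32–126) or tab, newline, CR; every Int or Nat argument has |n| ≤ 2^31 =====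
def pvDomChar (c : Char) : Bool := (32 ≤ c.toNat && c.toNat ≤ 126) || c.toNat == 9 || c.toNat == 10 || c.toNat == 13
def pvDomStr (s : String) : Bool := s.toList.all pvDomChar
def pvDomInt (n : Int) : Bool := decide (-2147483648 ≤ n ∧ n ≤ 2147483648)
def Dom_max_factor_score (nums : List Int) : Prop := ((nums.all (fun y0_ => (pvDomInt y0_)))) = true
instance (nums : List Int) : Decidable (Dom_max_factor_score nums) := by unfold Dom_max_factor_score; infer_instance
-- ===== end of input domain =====

-- B replaces A's O(n^2) per-removal re-reduction by suffix lcm/gcd arrays plus a running prefix (one backward and one forward pass).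

-- ===== PORT A =====
-- math.gcd(a, b): nonnegative gcd of absolute values = Int.gcd
def pyGcd (a b : Int) : Int := ((Int.gcd a b : Nat) : Int)
-- the module helper lcm(a, b) = a * b // gcd(a, b)
def pyLcm (a b : Int) : Int := PySem.Int.floordiv (a * b) (pyGcd a b)
-- reduce(lcm, arr) / reduce(gcd, arr); Python raises TypeError on [], excluded by Pre_
def arrayLcm : List Int → Int
  | [] => 0
  | x :: t => t.foldl pyLcm x
def arrayGcd : List Int → Int
  | [] => 0
  | x :: t => t.foldl pyGcd x
-- one iteration of A's loop over i (new_nums = nums[:i] + nums[i+1:])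
def bodyA (nums : List Int) (ms i : Int) : Int :=
  max ms (arrayLcm (PySem.List.slice nums none (some i) ++ PySem.List.slice nums (some (i + 1)) none)
        * arrayGcd (PySem.List.slice nums none (some i) ++ PySem.List.slice nums (some (i + 1)) none))

def max_factor_score (nums : List Int) : Int :=
  if (nums.length : Int) = 1 then (PySem.List.pyGetD nums 0 0) ^ 2
  else
    (PySem.List.pyRange 0 (nums.length : Int) 1).foldl (bodyA nums)
      (arrayLcm nums * arrayGcd nums)

-- ===== PORT B =====
-- the backward loop of Source B building (suf_l[i], suf_g[i]); suf_l[i+1]/suf_g[i+1] is the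
-- head of the already-built tail of the array
def sufArrB : List Int → List (Int × Int)
  | [] => []
  | [x] => [(x, x)]
  | x :: y :: t =>
    let s := sufArrB (y :: t)
    (pyLcm (s.headD (0, 0)).1 x, pyGcd (s.headD (0, 0)).2 x) :: s

-- one iteration of Source B's forward loop; state s = (best, pre_l, pre_g)
def bodyB (nums : List Int) (suf : List (Int × Int)) (n : Int)
    (s : Int × Int × Int) (i : Int) : Int × Int × Int :=
  (max s.1
      (if i = n - 1 then s.2.1 * s.2.2
       else pyLcm s.2.1 (PySem.List.pyGetD suf (i + 1) (0, 0)).1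
          * pyGcd s.2.2 (PySem.List.pyGetD suf (i + 1) (0, 0)).2),
   pyLcm s.2.1 (PySem.List.pyGetD nums i 0),
   pyGcd s.2.2 (PySem.List.pyGetD nums i 0))

def max_factor_score_alt (nums : List Int) : Int :=
  if ((nums.length : Int)) = 1 then (PySem.List.pyGetD nums 0 0) ^ 2
  else
    ((PySem.List.pyRange 1 (nums.length : Int) 1).foldl
        (bodyB nums (sufArrB nums) (nums.length : Int))
        (max ((PySem.List.pyGetD (sufArrB nums) 0 (0, 0)).1
                * (PySem.List.pyGetD (sufArrB nums) 0 (0, 0)).2)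
             ((PySem.List.pyGetD (sufArrB nums) 1 (0, 0)).1
                * (PySem.List.pyGetD (sufArrB nums) 1 (0, 0)).2),
         PySem.List.pyGetD nums 0 0, PySem.List.pyGetD nums 0 0)).1

-- ===== PRECONDITION & SPEC =====
-- Pre_ excludes exactly the inputs where A raises: [] (TypeError in reduce) and
-- lists with two or more zeros (ZeroDivisionError in lcm via gcd = 0); B raises there too.
def Pre_max_factor_score (nums : List Int) : Prop := nums ≠ [] ∧ nums.count 0 ≤ 1
instance (nums : List Int) : Decidable (Pre_max_factor_score nums) := by
  unfold Pre_max_factor_score; infer_instance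
def pvWitness_max_factor_score : List Int := [2, -3, 4]

def Spec_max_factor_score (nums : List Int) (out : Int) : Prop := out = max_factor_score_alt nums
instance (nums : List Int) (out : Int) : Decidable (Spec_max_factor_score nums out) := by
  unfold Spec_max_factor_score; infer_instance

-- ===== CLAIM (what is proved, stated in full; the proofs are below) =====
def Claim_equal_max_factor_score : Prop :=
  ∀ (nums : List Int), Dom_max_factor_score nums → Pre_max_factor_score nums →
    Spec_max_factor_score nums (max_factor_score nums)

-- ===== LEMMAS AND PROOFS =====

-- closed forms used only in the proofs
def nlcmL (xs : List Int) : Nat := xs.foldl (fun n x => Nat.lcm n x.natAbs) 1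
def sgnL (xs : List Int) : Int := (xs.map Int.sign).prod
def EL (xs : List Int) : Int := if (0 : Int) ∈ xs then 0 else sgnL xs * (nlcmL xs : Int)
def ngcdL (xs : List Int) : Nat := xs.foldl (fun n x => Nat.gcd n x.natAbs) 0

theorem count0_cons (x : Int) (l : List Int) :
    (x :: l).count 0 = l.count 0 + if x = 0 then 1 else 0 := by
  by_cases hx : x = 0
  · subst hx; simp [List.count_cons]
  · simp [List.count_cons, hx, Ne.symm hx]

theorem sign_pm (x : Int) (hx : x ≠ 0) : x.sign = 1 ∨ x.sign = -1 := by
  rcases lt_trichotomy x 0 with h | h | h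
  · exact Or.inr (Int.sign_eq_neg_one_iff_neg.mpr h)
  · exact absurd h hx
  · exact Or.inl (Int.sign_eq_one_iff_pos.mpr h)

theorem pyLcm_comm (a b : Int) : pyLcm a b = pyLcm b a := by
  unfold pyLcm pyGcd
  rw [mul_comm, Int.gcd_comm]

theorem pyLcm_eq (a b : Int) (h : ¬(a = 0 ∧ b = 0)) :
    pyLcm a b = a.sign * b.sign * ((Nat.lcm a.natAbs b.natAbs : Nat) : Int) := by
  have hg0 : Int.gcd a b ≠ 0 := fun h0 => h (Int.gcd_eq_zero_iff.mp h0)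
  have hgpos : (0 : Int) < ((Int.gcd a b : Nat) : Int) := by
    exact_mod_cast Nat.pos_of_ne_zero hg0
  have hgl : a.natAbs * b.natAbs = Int.gcd a b * Nat.lcm a.natAbs b.natAbs :=
    (Nat.gcd_mul_lcm _ _).symm
  have h1 : a * b = ((Int.gcd a b : Nat) : Int) *
      (a.sign * b.sign * ((Nat.lcm a.natAbs b.natAbs : Nat) : Int)) := by
    calc a * b = (a.sign * (a.natAbs : Int)) * (b.sign * (b.natAbs : Int)) := by
          rw [Int.sign_mul_natAbs, Int.sign_mul_natAbs]
      _ = (a.sign * b.sign) * ((a.natAbs * b.natAbs : Nat) : Int) := by push_cast; ring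
      _ = (a.sign * b.sign) * ((Int.gcd a b * Nat.lcm a.natAbs b.natAbs : Nat) : Int) := by
          rw [hgl]
      _ = _ := by push_cast; ring
  unfold pyLcm pyGcd
  rw [PySem.Int.floordiv_eq_ediv_of_pos hgpos, h1,
    Int.mul_ediv_cancel_left _ hgpos.ne']

theorem pyLcm_ne_zero (a b : Int) (ha : a ≠ 0) (hb : b ≠ 0) : pyLcm a b ≠ 0 := by
  rw [pyLcm_eq a b (by tauto)]
  have hl : (0 : Int) < ((Nat.lcm a.natAbs b.natAbs : Nat) : Int) := by
    exact_mod_cast Nat.pos_of_ne_zero (Nat.lcm_ne_zero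
      (Int.natAbs_ne_zero.mpr ha) (Int.natAbs_ne_zero.mpr hb))
  rcases sign_pm a ha with h1 | h1 <;> rcases sign_pm b hb with h2 | h2 <;>
    rw [h1, h2] <;> intro hc <;> omega

theorem pyLcm_zero_left (b : Int) (hb : b ≠ 0) : pyLcm 0 b = 0 := by
  rw [pyLcm_eq 0 b (by tauto)]; simp

theorem pyLcm_zero_right (a : Int) (ha : a ≠ 0) : pyLcm a 0 = 0 := by
  rw [pyLcm_comm]; exact pyLcm_zero_left a ha

theorem sgnL_cons (x : Int) (t : List Int) : sgnL (x :: t) = x.sign * sgnL t := by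
  simp [sgnL]

theorem sgnL_append (xs ys : List Int) : sgnL (xs ++ ys) = sgnL xs * sgnL ys := by
  simp [sgnL]

theorem sgnL_pm (xs : List Int) (h : (0 : Int) ∉ xs) : sgnL xs = 1 ∨ sgnL xs = -1 := by
  induction xs with
  | nil => simp [sgnL]
  | cons x t ih =>
    have hx : x ≠ 0 := fun hx => h (by simp [hx])
    have ht := ih (fun hm => h (List.mem_cons_of_mem _ hm))
    rw [sgnL_cons]
    rcases sign_pm x hx with h1 | h1 <;> rcases ht with h2 | h2 <;> rw [h1, h2] <;> simp

theorem lcm_hoist (t : List Int) : ∀ a b : Nat,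
    t.foldl (fun n x => Nat.lcm n x.natAbs) (Nat.lcm a b)
      = Nat.lcm a (t.foldl (fun n x => Nat.lcm n x.natAbs) b) := by
  induction t with
  | nil => intro a b; rfl
  | cons y t ih =>
    intro a b
    simp only [List.foldl_cons]
    rw [Nat.lcm_assoc, ih]

theorem nlcmL_cons (x : Int) (t : List Int) :
    nlcmL (x :: t) = t.foldl (fun n x => Nat.lcm n x.natAbs) x.natAbs := by
  simp [nlcmL, Nat.lcm_one_left]

theorem nlcmL_append (xs ys : List Int) :
    nlcmL (xs ++ ys) = Nat.lcm (nlcmL xs) (nlcmL ys) := by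
  unfold nlcmL
  rw [List.foldl_append]
  conv_lhs => rw [show (List.foldl (fun n x => Nat.lcm n x.natAbs) 1 xs)
    = Nat.lcm (List.foldl (fun n x => Nat.lcm n x.natAbs) 1 xs) 1 from (Nat.lcm_one_right _).symm]
  rw [lcm_hoist]

theorem nlcmL_pos_aux (xs : List Int) : ∀ a : Nat, (0 : Int) ∉ xs → 0 < a →
    0 < xs.foldl (fun n x => Nat.lcm n x.natAbs) a := by
  induction xs with
  | nil => intro a _ ha; exact ha
  | cons y t ih =>
    intro a h ha
    have hy : y ≠ 0 := fun hy => h (by simp [hy])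
    simp only [List.foldl_cons]
    exact ih _ (fun hm => h (List.mem_cons_of_mem _ hm))
      (Nat.lcm_pos ha (Int.natAbs_pos.mpr hy))

theorem nlcmL_pos (xs : List Int) (h : (0 : Int) ∉ xs) : 0 < nlcmL xs :=
  nlcmL_pos_aux xs 1 h Nat.one_pos

theorem EL_zero (xs : List Int) (h : (0 : Int) ∈ xs) : EL xs = 0 := by
  simp [EL, h]

theorem EL_of_not_mem (xs : List Int) (h : (0 : Int) ∉ xs) :
    EL xs = sgnL xs * (nlcmL xs : Int) := by
  simp [EL, h]

theorem EL_ne_zero (xs : List Int) (h : (0 : Int) ∉ xs) : EL xs ≠ 0 := by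
  rw [EL_of_not_mem xs h]
  have h1 := nlcmL_pos xs h
  rcases sgnL_pm xs h with h2 | h2 <;> rw [h2] <;> intro hc <;> omega

theorem EL_singleton (x : Int) : EL [x] = x := by
  by_cases hx : x = 0
  · simp [EL, hx]
  · rw [EL_of_not_mem _ (by simp [eq_comm, hx])]
    have h1 : sgnL [x] = x.sign := by simp [sgnL]
    have h2 : nlcmL [x] = x.natAbs := by simp [nlcmL]
    rw [h1, h2, Int.sign_mul_natAbs]

theorem EL_sign (xs : List Int) (h : (0 : Int) ∉ xs) : (EL xs).sign = sgnL xs := by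
  rw [EL_of_not_mem xs h]
  have h1 := nlcmL_pos xs h
  have h3 : ((nlcmL xs : Nat) : Int).sign = 1 :=
    Int.sign_eq_one_iff_pos.mpr (by exact_mod_cast h1)
  rw [Int.sign_mul, h3, mul_one]
  rcases sgnL_pm xs h with h2 | h2 <;> rw [h2] <;> rfl

theorem EL_natAbs (xs : List Int) (h : (0 : Int) ∉ xs) : (EL xs).natAbs = nlcmL xs := by
  rw [EL_of_not_mem xs h, Int.natAbs_mul]
  rcases sgnL_pm xs h with h2 | h2 <;> rw [h2] <;> simp

theorem EL_step (a b : Int) (t : List Int) (h : ¬(a = 0 ∧ b = 0)) :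
    EL (pyLcm a b :: t) = EL (a :: b :: t) := by
  by_cases ha : a = 0
  · have hb : b ≠ 0 := fun hb => h ⟨ha, hb⟩
    rw [ha, pyLcm_zero_left b hb, EL_zero _ (by simp), EL_zero _ (by simp)]
  · by_cases hb : b = 0
    · rw [hb, pyLcm_zero_right a ha, EL_zero _ (by simp), EL_zero _ (by simp)]
    · have hv : pyLcm a b ≠ 0 := pyLcm_ne_zero a b ha hb
      by_cases ht : (0 : Int) ∈ t
      · rw [EL_zero _ (List.mem_cons_of_mem _ ht),
          EL_zero _ (List.mem_cons_of_mem _ (List.mem_cons_of_mem _ ht))]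
      · have h1 : (0 : Int) ∉ pyLcm a b :: t := by
          intro hm; rcases List.mem_cons.mp hm with hm | hm
          · exact hv hm.symm
          · exact ht hm
        have h2 : (0 : Int) ∉ a :: b :: t := by
          intro hm; rcases List.mem_cons.mp hm with hm | hm
          · exact ha hm.symm
          rcases List.mem_cons.mp hm with hm | hm
          · exact hb hm.symm
          · exact ht hm
        rw [EL_of_not_mem _ h1, EL_of_not_mem _ h2]
        have hsv : (pyLcm a b).sign = a.sign * b.sign := by
          rw [pyLcm_eq a b h]
          have hl : (0 : Int) < ((Nat.lcm a.natAbs b.natAbs : Nat) : Int) := by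
            exact_mod_cast Nat.pos_of_ne_zero (Nat.lcm_ne_zero
              (Int.natAbs_ne_zero.mpr ha) (Int.natAbs_ne_zero.mpr hb))
          rw [Int.sign_mul, Int.sign_eq_one_iff_pos.mpr hl, mul_one]
          rcases sign_pm a ha with h3 | h3 <;> rcases sign_pm b hb with h4 | h4 <;>
            rw [h3, h4] <;> rfl
        have hav : (pyLcm a b).natAbs = Nat.lcm a.natAbs b.natAbs := by
          rw [pyLcm_eq a b h, Int.natAbs_mul]
          rcases sign_pm a ha with h3 | h3 <;> rcases sign_pm b hb with h4 | h4 <;>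
            rw [h3, h4] <;> simp
        rw [sgnL_cons, sgnL_cons, sgnL_cons, hsv, nlcmL_cons, nlcmL_cons, hav]
        simp only [List.foldl_cons]
        ring

theorem count_step (a b : Int) (t : List Int) (h : (a :: b :: t).count 0 ≤ 1) :
    (pyLcm a b :: t).count 0 ≤ 1 := by
  rw [count0_cons, count0_cons] at h
  rw [count0_cons]
  by_cases ha : a = 0
  · have hb : b ≠ 0 := by intro hb; rw [ha, hb] at h; simp at h
    rw [ha, pyLcm_zero_left b hb]
    split_ifs at h ⊢ <;> omega
  · by_cases hb : b = 0
    · rw [hb, pyLcm_zero_right a ha]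
      split_ifs at h ⊢ <;> omega
    · rw [if_neg (pyLcm_ne_zero a b ha hb)]
      split_ifs at h <;> omega

theorem fold_pyLcm (t : List Int) : ∀ x : Int, (x :: t).count 0 ≤ 1 →
    t.foldl pyLcm x = EL (x :: t) := by
  induction t with
  | nil => intro x _; exact (EL_singleton x).symm
  | cons y t ih =>
    intro x h
    have hxy : ¬(x = 0 ∧ y = 0) := by
      rintro ⟨rfl, rfl⟩
      rw [count0_cons, count0_cons] at h
      simp at h
    simp only [List.foldl_cons]
    rw [ih (pyLcm x y) (count_step x y t h), EL_step x y t hxy]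

theorem pyLcm_EL_EL (xs ys : List Int) (hx : xs ≠ []) (hy : ys ≠ [])
    (h : (xs ++ ys).count 0 ≤ 1) : pyLcm (EL xs) (EL ys) = EL (xs ++ ys) := by
  by_cases hmx : (0 : Int) ∈ xs
  · have hmy : (0 : Int) ∉ ys := by
      intro hmy
      have h1 : 1 ≤ xs.count 0 := List.one_le_count_iff.mpr hmx
      have h2 : 1 ≤ ys.count 0 := List.one_le_count_iff.mpr hmy
      rw [List.count_append] at h
      omega
    rw [EL_zero xs hmx, pyLcm_zero_left _ (EL_ne_zero ys hmy),
      EL_zero _ (by simp [hmx])]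
  · by_cases hmy : (0 : Int) ∈ ys
    · rw [EL_zero ys hmy, pyLcm_zero_right _ (EL_ne_zero xs hmx),
        EL_zero _ (by simp [hmy])]
    · have hm : (0 : Int) ∉ xs ++ ys := by
        intro hm; rcases List.mem_append.mp hm with hm | hm
        · exact hmx hm
        · exact hmy hm
      rw [pyLcm_eq _ _ (fun hz => EL_ne_zero xs hmx hz.1),
        EL_sign xs hmx, EL_sign ys hmy, EL_natAbs xs hmx, EL_natAbs ys hmy,
        EL_of_not_mem _ hm, sgnL_append, nlcmL_append]

theorem arrayLcm_eq_EL (xs : List Int) (hx : xs ≠ []) (h : xs.count 0 ≤ 1) :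
    arrayLcm xs = EL xs := by
  cases xs with
  | nil => exact absurd rfl hx
  | cons x t => exact fold_pyLcm t x h

theorem arrayLcm_append (xs ys : List Int) (hx : xs ≠ []) (hy : ys ≠ [])
    (h : (xs ++ ys).count 0 ≤ 1) :
    arrayLcm (xs ++ ys) = pyLcm (arrayLcm xs) (arrayLcm ys) := by
  have hcx : xs.count 0 ≤ 1 := by rw [List.count_append] at h; omega
  have hcy : ys.count 0 ≤ 1 := by rw [List.count_append] at h; omega
  rw [arrayLcm_eq_EL xs hx hcx, arrayLcm_eq_EL ys hy hcy,
    arrayLcm_eq_EL (xs ++ ys) (by simp [hx]) h, pyLcm_EL_EL xs ys hx hy h]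

theorem arrayLcm_concat (xs : List Int) (a : Int) (hx : xs ≠ []) :
    arrayLcm (xs ++ [a]) = pyLcm (arrayLcm xs) a := by
  cases xs with
  | nil => exact absurd rfl hx
  | cons x t => simp [arrayLcm, List.foldl_append]

theorem arrayLcm_cons (x : Int) (xs : List Int) (hx : xs ≠ [])
    (h : (x :: xs).count 0 ≤ 1) :
    arrayLcm (x :: xs) = pyLcm (arrayLcm xs) x := by
  have h1 : x :: xs = [x] ++ xs := rfl
  rw [h1, arrayLcm_append [x] xs (by simp) hx (by simpa using h)]
  simp only [arrayLcm]
  rw [pyLcm_comm]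
  rfl

-- gcd side
theorem pyGcd_eq (a b : Int) : pyGcd a b = ((Nat.gcd a.natAbs b.natAbs : Nat) : Int) := rfl

theorem gcd_hoist (t : List Int) : ∀ a b : Nat,
    t.foldl (fun n x => Nat.gcd n x.natAbs) (Nat.gcd a b)
      = Nat.gcd a (t.foldl (fun n x => Nat.gcd n x.natAbs) b) := by
  induction t with
  | nil => intro a b; rfl
  | cons y t ih =>
    intro a b
    simp only [List.foldl_cons]
    rw [Nat.gcd_assoc, ih]

theorem ngcdL_append (xs ys : List Int) :
    ngcdL (xs ++ ys) = Nat.gcd (ngcdL xs) (ngcdL ys) := by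
  unfold ngcdL
  rw [List.foldl_append]
  conv_lhs => rw [show (List.foldl (fun n x => Nat.gcd n x.natAbs) 0 xs)
    = Nat.gcd (List.foldl (fun n x => Nat.gcd n x.natAbs) 0 xs) 0 from (Nat.gcd_zero_right _).symm]
  rw [gcd_hoist]

theorem gcd_fold_cast (t : List Int) : ∀ n : Nat,
    t.foldl pyGcd ((n : Nat) : Int)
      = ((t.foldl (fun m x => Nat.gcd m x.natAbs) n : Nat) : Int) := by
  induction t with
  | nil => intro n; rfl
  | cons y t ih =>
    intro n
    simp only [List.foldl_cons]
    rw [show pyGcd ((n : Nat) : Int) y = ((Nat.gcd n y.natAbs : Nat) : Int) by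
      simp [pyGcd_eq]]
    exact ih _

theorem arrayGcd_two (xs : List Int) (h : 2 ≤ xs.length) :
    arrayGcd xs = ((ngcdL xs : Nat) : Int) := by
  cases xs with
  | nil => simp at h
  | cons x t =>
    cases t with
    | nil => simp at h
    | cons y t' =>
      show (y :: t').foldl pyGcd x = _
      simp only [List.foldl_cons]
      rw [show pyGcd x y = ((Nat.gcd x.natAbs y.natAbs : Nat) : Int) from rfl, gcd_fold_cast]
      congr 1
      simp [ngcdL]

theorem arrayGcd_natAbs (xs : List Int) (hx : xs ≠ []) :
    (arrayGcd xs).natAbs = ngcdL xs := by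
  cases xs with
  | nil => exact absurd rfl hx
  | cons x t =>
    cases t with
    | nil => simp [arrayGcd, ngcdL]
    | cons y t' =>
      rw [arrayGcd_two _ (by simp only [List.length_cons]; omega)]
      simp

theorem arrayGcd_append (xs ys : List Int) (hx : xs ≠ []) (hy : ys ≠ []) :
    arrayGcd (xs ++ ys) = pyGcd (arrayGcd xs) (arrayGcd ys) := by
  obtain ⟨x, t, rfl⟩ := List.exists_cons_of_ne_nil hx
  obtain ⟨y, r, rfl⟩ := List.exists_cons_of_ne_nil hy
  rw [arrayGcd_two _ (by simp only [List.length_append, List.length_cons]; omega),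
    ngcdL_append, pyGcd_eq, arrayGcd_natAbs _ (by simp), arrayGcd_natAbs _ (by simp)]

theorem arrayGcd_concat (xs : List Int) (a : Int) (hx : xs ≠ []) :
    arrayGcd (xs ++ [a]) = pyGcd (arrayGcd xs) a := by
  cases xs with
  | nil => exact absurd rfl hx
  | cons x t => simp [arrayGcd, List.foldl_append]

theorem arrayGcd_cons (x : Int) (xs : List Int) (hx : xs ≠ []) :
    arrayGcd (x :: xs) = pyGcd (arrayGcd xs) x := by
  have h1 : x :: xs = [x] ++ xs := rfl
  rw [h1, arrayGcd_append [x] xs (by simp) hx]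
  simp only [arrayGcd]
  rw [pyGcd_eq, pyGcd_eq, Nat.gcd_comm]
  rfl

-- the suffix array built by B holds the reduce-folds of all suffixes
theorem sufArr_spec : ∀ (xs : List Int), xs ≠ [] → xs.count 0 ≤ 1 →
    sufArrB xs = (List.range xs.length).map
      (fun i => (arrayLcm (xs.drop i), arrayGcd (xs.drop i)))
  | [], hx, _ => absurd rfl hx
  | [x], _, _ => by
      simp [sufArrB, List.range_one, arrayLcm, arrayGcd]
  | x :: y :: t, _, hc => by
      have hct : (y :: t).count 0 ≤ 1 := by
        rw [count0_cons] at hc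
        split_ifs at hc <;> omega
      have ih := sufArr_spec (y :: t) (by simp) hct
      have hhead : ((sufArrB (y :: t)).headD (0, 0)) = (arrayLcm (y :: t), arrayGcd (y :: t)) := by
        rw [ih, show (y :: t).length = t.length + 1 from rfl, List.range_succ_eq_map,
          List.map_cons, List.headD_cons, List.drop_zero]
      show ((pyLcm ((sufArrB (y :: t)).headD (0, 0)).1 x,
             pyGcd ((sufArrB (y :: t)).headD (0, 0)).2 x) :: sufArrB (y :: t)) = _
      rw [hhead, ih]
      rw [show (pyLcm (arrayLcm (y :: t), arrayGcd (y :: t)).1 x,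
                pyGcd (arrayLcm (y :: t), arrayGcd (y :: t)).2 x)
            = (arrayLcm (x :: y :: t), arrayGcd (x :: y :: t)) by
        rw [arrayLcm_cons x (y :: t) (by simp) hc, arrayGcd_cons x (y :: t) (by simp)]]
      rw [show (x :: y :: t).length = (y :: t).length + 1 from rfl,
        List.range_succ_eq_map, List.map_cons, List.map_map, List.drop_zero]
      congr 1

theorem getD_map_range_pair (f : Nat → Int × Int) (n k : Nat) (h : k < n) :
    ((List.range n).map f).getD k (0, 0) = f k := by
  rw [List.getD_eq_getElem?_getD, List.getElem?_map, List.getElem?_range h]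
  rfl

-- the main loop correspondence: from index k on, A's fold and B's fold agree,
-- provided B's running prefix state is the reduce-fold of nums[:k]
theorem loop_eq (nums : List Int) (hc : nums.count 0 ≤ 1) (h2 : 2 ≤ nums.length) :
    ∀ (fuel : Nat), ∀ (k : Nat) (acc : Int), nums.length ≤ k + fuel → 1 ≤ k → k ≤ nums.length →
    (PySem.List.pyRange (k : Int) (nums.length : Int) 1).foldl (bodyA nums) acc
      = ((PySem.List.pyRange (k : Int) (nums.length : Int) 1).foldl
          (bodyB nums (sufArrB nums) (nums.length : Int))
          (acc, arrayLcm (nums.take k), arrayGcd (nums.take k))).1 := by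
  intro fuel
  induction fuel with
  | zero =>
    intro k acc hf h1 hk
    have hkl : (nums.length : Int) ≤ (k : Int) := by omega
    rw [PySem.List.pyRange_one_eq_nil hkl]
    rfl
  | succ fuel ih =>
    intro k acc hf h1 hk
    by_cases hkl : k = nums.length
    · rw [hkl, PySem.List.pyRange_one_eq_nil (le_refl _)]
      rfl
    · have hklt : k < nums.length := by omega
      have htk : nums.take k ≠ [] := by
        intro hnil
        have hlen : (nums.take k).length = min k nums.length := List.length_take
        rw [hnil] at hlen
        simp at hlen
        omega
      have hxk : PySem.List.pyGetD nums (k : Int) 0 = nums[k] := by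
        rw [PySem.List.pyGetD_natCast, List.getD_eq_getElem?_getD,
          List.getElem?_eq_getElem hklt]
        rfl
      have htake : nums.take (k + 1) = nums.take k ++ [nums[k]] := by
        rw [List.take_succ, List.getElem?_eq_getElem hklt]
        rfl
      have hupL : pyLcm (arrayLcm (nums.take k)) (PySem.List.pyGetD nums (k : Int) 0)
          = arrayLcm (nums.take (k + 1)) := by
        rw [hxk, htake, arrayLcm_concat _ _ htk]
      have hupG : pyGcd (arrayGcd (nums.take k)) (PySem.List.pyGetD nums (k : Int) 0)
          = arrayGcd (nums.take (k + 1)) := by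
        rw [hxk, htake, arrayGcd_concat _ _ htk]
      have hcast : ((k : Int) + 1) = (((k + 1 : Nat)) : Int) := by push_cast; ring
      have hA : bodyA nums acc (k : Int)
          = max acc (arrayLcm (nums.take k ++ nums.drop (k + 1))
              * arrayGcd (nums.take k ++ nums.drop (k + 1))) := by
        unfold bodyA
        rw [hcast, PySem.List.slice_to_natCast, PySem.List.slice_from_natCast]
      have hB : bodyB nums (sufArrB nums) (nums.length : Int)
            (acc, arrayLcm (nums.take k), arrayGcd (nums.take k)) (k : Int)
          = (max acc (arrayLcm (nums.take k ++ nums.drop (k + 1))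
                * arrayGcd (nums.take k ++ nums.drop (k + 1))),
             arrayLcm (nums.take (k + 1)), arrayGcd (nums.take (k + 1))) := by
        simp only [bodyB]
        by_cases hlast : k = nums.length - 1
        · have hif : (k : Int) = (nums.length : Int) - 1 := by omega
          rw [if_pos hif]
          have hdrop : nums.drop (k + 1) = [] := by
            rw [List.drop_eq_nil_iff]; omega
          rw [hdrop, List.append_nil, hupL, hupG]
        · have hif : ¬((k : Int) = (nums.length : Int) - 1) := by omega
          rw [if_neg hif]
          have hk1 : k + 1 < nums.length := by omega
          have hsuf : PySem.List.pyGetD (sufArrB nums) ((k : Int) + 1) (0, 0)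
              = (arrayLcm (nums.drop (k + 1)), arrayGcd (nums.drop (k + 1))) := by
            rw [hcast, PySem.List.pyGetD_natCast,
              sufArr_spec nums (by intro hnil; rw [hnil] at h2; simp at h2) hc,
              getD_map_range_pair _ _ _ hk1]
          rw [hsuf]
          have hdne : nums.drop (k + 1) ≠ [] := by
            rw [Ne, List.drop_eq_nil_iff]; omega
          have hcnt : (nums.take k ++ nums.drop (k + 1)).count 0 ≤ 1 := by
            have hsub : (nums.take k ++ nums.drop (k + 1)).Sublist nums := by
              have hd : (nums.drop (k + 1)).Sublist (nums.drop k) := by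
                rw [← List.tail_drop]; exact List.tail_sublist _
              have := hd.append_left (nums.take k)
              rwa [List.take_append_drop] at this
            exact le_trans (hsub.count_le 0) hc
          rw [← arrayLcm_append _ _ htk hdne hcnt, ← arrayGcd_append _ _ htk hdne,
            hupL, hupG]
      rw [PySem.List.pyRange_one_cons (by exact_mod_cast hklt)]
      simp only [List.foldl_cons]
      rw [hA, hB, hcast]
      exact ih (k + 1) _ (by omega) (by omega) (by omega)

-- ===== VERDICT (by name: the statement is the Claim_ definition above) =====
theorem max_factor_score_spec : Claim_equal_max_factor_score := by
  intro nums _ hpre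
  obtain ⟨hne, hc⟩ := hpre
  unfold Spec_max_factor_score
  by_cases h1 : nums.length = 1
  · obtain ⟨a, rfl⟩ := List.length_eq_one_iff.mp h1
    rfl
  · have h0 : nums.length ≠ 0 := fun h => hne (List.eq_nil_of_length_eq_zero h)
    have h2 : 2 ≤ nums.length := by omega
    have hiff : ¬((nums.length : Int) = 1) := by omega
    rw [max_factor_score, max_factor_score_alt, if_neg hiff, if_neg hiff]
    have hs := sufArr_spec nums hne hc
    have hs0 : PySem.List.pyGetD (sufArrB nums) 0 (0, 0) = (arrayLcm nums, arrayGcd nums) := by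
      rw [PySem.List.pyGetD_zero, hs, getD_map_range_pair _ _ _ (by omega)]
      simp
    have hs1 : PySem.List.pyGetD (sufArrB nums) 1 (0, 0)
        = (arrayLcm (nums.drop 1), arrayGcd (nums.drop 1)) := by
      rw [hs, show (1 : Int) = ((1 : Nat) : Int) from rfl,
        PySem.List.pyGetD_ofNat _ _ _ (by simpa using (by omega : 1 < nums.length))]
      rw [List.getElem_map, List.getElem_range]
    have ht1 : nums.take 1 = [nums[0]] := by
      rw [show (1 : Nat) = 0 + 1 from rfl, List.take_succ,
        List.getElem?_eq_getElem (by omega : 0 < nums.length)]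
      rfl
    have hx0 : PySem.List.pyGetD nums 0 0 = nums[0] := by
      rw [PySem.List.pyGetD_zero, List.getD_eq_getElem?_getD,
        List.getElem?_eq_getElem (by omega : 0 < nums.length)]
      rfl
    rw [PySem.List.pyRange_one_cons (by omega : (0 : Int) < (nums.length : Int))]
    simp only [List.foldl_cons]
    have hA0 : bodyA nums (arrayLcm nums * arrayGcd nums) 0
        = max (arrayLcm nums * arrayGcd nums)
            (arrayLcm (nums.drop 1) * arrayGcd (nums.drop 1)) := by
      unfold bodyA
      rw [PySem.List.slice_to _ (by norm_num : (0 : Int) ≤ 0),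
        PySem.List.slice_from _ (show (0 : Int) ≤ 0 + 1 by norm_num)]
      simp
    rw [hA0, hs0, hs1, hx0]
    have hloop := loop_eq nums hc h2 nums.length 1
      (max (arrayLcm nums * arrayGcd nums) (arrayLcm (nums.drop 1) * arrayGcd (nums.drop 1)))
      (by omega) (by omega) (by omega)
    rw [ht1] at hloop
    rw [show ((0 : Int) + 1) = ((1 : Nat) : Int) by norm_num]
    exact hloop
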